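-- pv_equiv track=rewrite | github.com/Cracked-Fisko/picoCFT | find_password.py | reverse_transform_character
-- ===== SOURCE A (Python) =====
-- def reverse_transform_character(c, i_1):
--     # This function reverses the transformation of a single character
--     for a in range(26):  # Try all possible shifts for 'a' to 'z'
--         # Calculate uVar1 as per the original code
--         uVar1 = (i_1 % 0xff >> 1 & 0x55) + (i_1 % 0xff & 0x55)
--         uVar1 = ((uVar1 >> 2) & 0x33) + (uVar1 & 0x33)
--
--         # Calculate the original input character
--         iVar2 = ord(c) - ord('a')
--         original_input = (iVar2 - (uVar1 >> 4) - (uVar1 & 0xf) + a) % 26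
--         original_input = (original_input + 26) % 26  # Ensure positive value
--         original_input += ord('a')  # Convert back to character
--
--         if 97 <= original_input <= 122:  # Ensure it falls in 'a' to 'z'
--             return chr(original_input)
-- ===== SOURCE B (Python) =====
-- def reverse_transform_character(c, i_1):
--     # Inverse-by-forward-search: instead of inverting the shift arithmetically,
--     # forward-encrypt each candidate letter and return the one that maps to c's residue.
--     def popcount(m):
--         return 0 if m == 0 else (m & 1) + popcount(m >> 1)
--     shift = popcount(i_1 % 0xff)
--     target = (ord(c) - 97) % 26
--     for x in range(97, 123):
--         if (x - 97 + shift) % 26 == target: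
--             return chr(x)
-- ===== Notes on version B (the rewrite author's own statement) =====
-- stated objective: alternative
-- what changed: B inverts the cipher by forward search: it computes the shift with a recursive bit-by-bit popcount (instead of A's SWAR nibble sums) and then scans candidates 'a'..'z', returning the first letter whose forward shift matches c's residue, instead of A's direct inverse arithmetic inside a range(26) loop that always returns on its first iteration.
import Mathlib
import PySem

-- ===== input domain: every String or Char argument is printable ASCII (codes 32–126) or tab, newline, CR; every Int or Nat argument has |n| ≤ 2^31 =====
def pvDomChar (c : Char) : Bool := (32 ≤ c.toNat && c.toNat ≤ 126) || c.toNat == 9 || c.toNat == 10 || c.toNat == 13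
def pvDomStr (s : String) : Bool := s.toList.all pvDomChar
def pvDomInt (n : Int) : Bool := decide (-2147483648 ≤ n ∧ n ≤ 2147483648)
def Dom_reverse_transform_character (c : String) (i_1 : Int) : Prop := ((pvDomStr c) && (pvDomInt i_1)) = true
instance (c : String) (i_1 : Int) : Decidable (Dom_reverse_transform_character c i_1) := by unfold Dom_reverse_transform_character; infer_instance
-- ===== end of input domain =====

-- B inverts the cipher by forward search over candidate letters with a recursive popcount,
-- instead of A's direct inverse arithmetic with a SWAR popcount (objective: alternative).

-- ===== PORT A =====
-- the per-iteration body of A's `for a in range(26)` loop; returns `some` on `return`.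
-- Bit operations are done on Nat: exact, since Python's `i_1 % 0xff` is nonnegative (positive divisor).
def rtcLoop (oc : Nat) (i_1 : Int) : List Int → Option String
  | [] => none
  | a :: rest =>
    let m : Nat := (PySem.Int.mod i_1 255).toNat
    let u1 : Nat := ((m >>> 1) &&& 0x55) + (m &&& 0x55)
    let u2 : Nat := ((u1 >>> 2) &&& 0x33) + (u1 &&& 0x33)
    let iVar2 : Int := (oc : Int) - 97
    let oi1 : Int := PySem.Int.mod (iVar2 - ((u2 >>> 4 : Nat) : Int) - ((u2 &&& 0xf : Nat) : Int) + a) 26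
    let oi2 : Int := PySem.Int.mod (oi1 + 26) 26
    let oi3 : Int := oi2 + 97
    if 97 ≤ oi3 ∧ oi3 ≤ 122 then some (String.mk [Char.ofNat oi3.toNat])
    else rtcLoop oc i_1 rest

def reverse_transform_character (c : String) (i_1 : Int) : String :=
  match c.toList with
  | [ch] => (rtcLoop ch.toNat i_1 (PySem.List.pyRange 0 26 1)).getD ""  -- none (falling off the loop) cannot occur
  | _ => ""  -- Python's ord(c) raises TypeError here: excluded by Pre_

-- ===== PORT B =====
-- Source B's recursive popcount; on Nat since i_1 % 0xff is nonnegative (`& 1` = `&&& 1`, `>> 1` = `>>> 1`, exact)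
-- structural recursion on a fuel initialised to m itself (m >>> 1 < m, so fuel m always suffices);
-- the fuel only makes Python's terminating recursion structurally total, it never changes the value
def popAux : Nat → Nat → Nat
  | _, 0 => 0
  | 0, _ + 1 => 0  -- fuel exhausted: unreachable for fuel ≥ m
  | f + 1, m + 1 => ((m + 1) &&& 1) + popAux f ((m + 1) >>> 1)

def popcountB (m : Nat) : Nat := popAux m m

def reverse_transform_character_alt (c : String) (i_1 : Int) : String :=
  match c.toList with
  | [] => ""  -- ord(c) raises TypeError: excluded by Pre_
  | ch :: _ :: _ => ""  -- ord(c) raises TypeError: excluded by Pre_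
  | [ch] =>
    let shift : Nat := popcountB (PySem.Int.mod i_1 255).toNat
    let target : Int := PySem.Int.mod ((ch.toNat : Int) - 97) 26
    -- the `for x in range(97,123)` search loop: first candidate whose forward shift hits target
    match (PySem.List.pyRange 97 123 1).find?
        (fun x => PySem.Int.mod (x - 97 + (shift : Int)) 26 == target) with
    | some x => String.mk [Char.ofNat x.toNat]
    | none => ""  -- unreachable (a candidate always matches); Python would fall off returning None

-- ===== PRECONDITION & SPEC =====
-- Python's ord(c) (in both A and B) raises TypeError unless c is a single character.
def Pre_reverse_transform_character (c : String) (i_1 : Int) : Prop := c.toList.length = 1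
instance (c : String) (i_1 : Int) : Decidable (Pre_reverse_transform_character c i_1) := by unfold Pre_reverse_transform_character; infer_instance
def pvWitness_reverse_transform_character : String × Int := ("q", 37)

def Spec_reverse_transform_character (c : String) (i_1 : Int) (out : String) : Prop := out = reverse_transform_character_alt c i_1
instance (c : String) (i_1 : Int) (out : String) : Decidable (Spec_reverse_transform_character c i_1 out) := by unfold Spec_reverse_transform_character; infer_instance

-- ===== CLAIM (what is proved, stated in full; the proofs are below) =====
def Claim_equal_reverse_transform_character : Prop := ∀ (c : String) (i_1 : Int), Dom_reverse_transform_character c i_1 → Pre_reverse_transform_character c i_1 → Spec_reverse_transform_character c i_1 (reverse_transform_character c i_1)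

-- ===== LEMMAS AND PROOFS =====

theorem pyMod26 (x : Int) : PySem.Int.mod x 26 = x % 26 :=
  PySem.Int.mod_eq_emod_of_pos (by norm_num)

theorem mod255_lt (i : Int) : (PySem.Int.mod i 255).toNat < 255 := by
  have h : PySem.Int.mod i 255 = i % 255 := PySem.Int.mod_eq_emod_of_pos (by norm_num)
  have h2 : i % 255 < 255 := Int.emod_lt_of_pos i (by norm_num)
  have h0 : 0 ≤ i % 255 := Int.emod_nonneg i (by norm_num)
  omega

set_option maxRecDepth 8000 in
-- the SWAR nibble-sum in A equals B's recursive popcount, for all 8-bit values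
theorem swar_eq_popcountB : ∀ m : Nat, m < 255 →
    (((((m >>> 1) &&& 0x55) + (m &&& 0x55)) >>> 2 &&& 0x33) + ((((m >>> 1) &&& 0x55) + (m &&& 0x55)) &&& 0x33)) >>> 4
    + ((((((m >>> 1) &&& 0x55) + (m &&& 0x55)) >>> 2 &&& 0x33) + ((((m >>> 1) &&& 0x55) + (m &&& 0x55)) &&& 0x33)) &&& 0xf)
    = popcountB m := by decide

set_option maxRecDepth 8000 in
theorem popcountB_lt : ∀ m : Nat, m < 255 → popcountB m < 9 := by decide

set_option maxRecDepth 8000 in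
-- B's forward search over 'a'..'z' finds exactly the arithmetic inverse
theorem find_search : ∀ s : Nat, s < 9 → ∀ t : Nat, t < 26 →
    (PySem.List.pyRange 97 123 1).find?
      (fun x => PySem.Int.mod (x - 97 + (s : Int)) 26 == (t : Int))
    = some (97 + (((t : Int) - s) % 26)) := by decide

theorem rtcLoop_first (oc : Nat) (i1 : Int) (rest : List Int) :
    rtcLoop oc i1 (0 :: rest)
    = some (String.mk [Char.ofNat (((oc : Int) - 97 - ((popcountB (PySem.Int.mod i1 255).toNat : Nat) : Int)) % 26 + 97).toNat]) := by
  have hlt := mod255_lt i1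
  simp only [rtcLoop, pyMod26]
  set m : Nat := (PySem.Int.mod i1 255).toNat with hm
  have hswar := swar_eq_popcountB m hlt
  set s1 : Nat := (((m >>> 1 &&& 85) + (m &&& 85)) >>> 2 &&& 51) + ((m >>> 1 &&& 85) + (m &&& 85) &&& 51) with hs1
  have hcast : ((s1 >>> 4 : Nat) : Int) + ((s1 &&& 15 : Nat) : Int) = ((popcountB m : Nat) : Int) := by
    exact_mod_cast congrArg (Nat.cast (R := Int)) hswar
  split_ifs with h
  · exact congrArg (fun z : Int => some (String.mk [Char.ofNat (z + 97).toNat])) (by omega)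
  · exact (h ⟨by omega, by omega⟩).elim

-- ===== VERDICT (by name: the statement is the Claim_ definition above) =====
theorem reverse_transform_character_spec : Claim_equal_reverse_transform_character := by
  intro c i_1 _ hpre
  unfold Spec_reverse_transform_character reverse_transform_character reverse_transform_character_alt
  unfold Pre_reverse_transform_character at hpre
  obtain ⟨ch, hc⟩ : ∃ ch, c.toList = [ch] := by
    cases h : c.toList with
    | nil => simp [h] at hpre
    | cons a as => cases as with
      | nil => exact ⟨a, rfl⟩
      | cons b bs => simp [h] at hpre
  rw [hc]
  rw [show PySem.List.pyRange 0 26 1 = 0 :: PySem.List.pyRange 1 26 1 from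
      PySem.List.pyRange_one_cons (by norm_num)]
  dsimp only
  rw [rtcLoop_first]
  -- the B side
  have hs := popcountB_lt _ (mod255_lt i_1)
  have hgoal : ∀ s' : Int, 0 ≤ s' → s' < 9 → ∀ o : Int,
      (o - 97 - s') % 26 + 97 = 97 + ((o - 97) % 26 - s') % 26 := by
    intro s' h0 h9 o; omega
  set s : Nat := popcountB (PySem.Int.mod i_1 255).toNat with hsdef
  set oc : Int := (ch.toNat : Int) with hoc
  have ht0 : (0 : Int) ≤ (oc - 97) % 26 := Int.emod_nonneg _ (by norm_num)
  have ht1 : (oc - 97) % 26 < 26 := Int.emod_lt_of_pos _ (by norm_num)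
  have htnat : (((oc - 97) % 26).toNat : Int) = (oc - 97) % 26 := Int.toNat_of_nonneg ht0
  have hfind := find_search s hs ((oc - 97) % 26).toNat (by omega)
  rw [htnat] at hfind
  simp only [pyMod26] at hfind ⊢
  rw [hgoal (s : Int) (by positivity) (by exact_mod_cast hs) oc]
  simp only [hfind, Option.getD_some]
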